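-- pv_equiv track=rewrite | github.com/ANKS04UB/DSA_Assignment | Assignment 5.py | undouble
-- ===== SOURCE A (Python) =====
-- def undouble(changed):
--     result = []
--     for num in changed:
--         if num % 2 == 0:
--             result.append(num // 2)
--         else:
--             return []
--     return result
-- ===== SOURCE B (Python) =====
-- def undouble(changed):
--     if all(num % 2 == 0 for num in changed):
--         return [num // 2 for num in changed]
--     return []
-- ===== Notes on version B (the rewrite author's own statement) =====
-- stated objective: idiomatic
-- what changed: Replaces the single early-exiting accumulator loop by a validate-then-transform decomposition: one all() pass checking evenness, then a comprehension halving every element.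
import Mathlib
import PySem

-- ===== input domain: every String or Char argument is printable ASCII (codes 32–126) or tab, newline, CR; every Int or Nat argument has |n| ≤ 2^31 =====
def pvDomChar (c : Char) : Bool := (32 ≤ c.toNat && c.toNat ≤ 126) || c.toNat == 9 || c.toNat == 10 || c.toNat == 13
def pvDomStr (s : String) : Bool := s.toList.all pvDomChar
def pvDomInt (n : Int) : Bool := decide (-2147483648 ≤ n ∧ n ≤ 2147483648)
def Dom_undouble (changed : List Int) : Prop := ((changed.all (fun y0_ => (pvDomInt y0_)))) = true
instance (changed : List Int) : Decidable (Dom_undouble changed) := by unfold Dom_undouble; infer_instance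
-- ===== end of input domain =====

-- B replaces A's early-exiting accumulator loop by validate-then-transform (all-even check, then map); same return value, no speed claim.

-- ===== PORT A =====
-- literal transliteration of A's loop with early return: recursion over the list carrying `result`
def undoubleGo : List Int → List Int → List Int
  | [], result => result
  | num :: rest, result =>
      if PySem.Int.mod num 2 = 0 then undoubleGo rest (result ++ [PySem.Int.floordiv num 2])
      else []

def undouble (changed : List Int) : List Int := undoubleGo changed []

-- ===== PORT B =====
def undouble_alt (changed : List Int) : List Int :=
  if changed.all (fun num => PySem.Int.mod num 2 = 0) then
    changed.map (fun num => PySem.Int.floordiv num 2)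
  else []

-- ===== PRECONDITION & SPEC =====
def Spec_undouble (changed : List Int) (out : List Int) : Prop := out = undouble_alt changed
instance (changed : List Int) (out : List Int) : Decidable (Spec_undouble changed out) := by unfold Spec_undouble; infer_instance

-- ===== CLAIM (what is proved, stated in full; the proofs are below) =====
def Claim_equal_undouble : Prop := ∀ (changed : List Int), Dom_undouble changed → Spec_undouble changed (undouble changed)

-- ===== LEMMAS AND PROOFS =====
theorem undoubleGo_eq (l : List Int) : ∀ acc : List Int,
    undoubleGo l acc =
      if l.all (fun num => PySem.Int.mod num 2 = 0) then
        acc ++ l.map (fun num => PySem.Int.floordiv num 2)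
      else [] := by
  induction l with
  | nil => intro acc; simp [undoubleGo]
  | cons num rest ih =>
      intro acc
      simp only [undoubleGo, List.all_cons, List.map_cons]
      by_cases h : PySem.Int.mod num 2 = 0
      · rw [if_pos h, ih]
        simp only [h, decide_true, Bool.true_and]
        split <;> simp
      · rw [if_neg h]
        split
        · next hc => exact absurd (of_decide_eq_true ((Bool.and_eq_true _ _).mp hc).1) h
        · rfl

-- ===== VERDICT (by name: the statement is the Claim_ definition above) =====
theorem undouble_spec : Claim_equal_undouble := by
  intro changed _
  show undouble changed = undouble_alt changed
  simp [undouble, undouble_alt, undoubleGo_eq]
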